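-- pv_equiv track=rewrite | github.com/briday1/music-trivia | app.py | _place_songs_on_card
-- ===== SOURCE A (Python) =====
-- from typing import List, Tuple, Dict, Set, Optional
--
-- def _place_songs_on_card(selected_songs: List[str], card_size: int, free_space: bool) -> List[List[str]]:
--     """Helper to place a list of songs onto a card grid with FREE space."""
--     card = []
--     song_idx = 0
--     center = card_size // 2
--
--     for i in range(card_size):
--         row = []
--         for j in range(card_size):
--             if free_space and card_size % 2 == 1 and i == center and j == center:
--                 row.append("FREE SPACE")
--             else:
--                 if song_idx < len(selected_songs):
--                     row.append(selected_songs[song_idx])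
--                     song_idx += 1
--                 else:
--                     # Shouldn't happen, but fallback
--                     row.append(selected_songs[0] if selected_songs else "")
--         card.append(row)
--
--     return card
-- ===== SOURCE B (Python) =====
-- def _place_songs_on_card(selected_songs, card_size, free_space):
--     """Staged construction: build the flat padded song list, splice in the FREE
--     SPACE cell, then chunk into rows (no per-cell branching, no counter)."""
--     n = card_size
--     if n <= 0:
--         return []
--     total = n * n
--     has_free = free_space and n % 2 == 1
--     need = total - 1 if has_free else total
--     pad = selected_songs[0] if selected_songs else ""
--     cells = selected_songs[:need] + [pad] * max(0, need - len(selected_songs))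
--     if has_free:
--         c = n // 2
--         cells.insert(c * n + c, "FREE SPACE")
--     return [cells[r * n:(r + 1) * n] for r in range(n)]
-- ===== Notes on version B (the rewrite author's own statement) =====
-- stated objective: alternative
-- what changed: Replaced A's nested per-cell loops with a counter and per-cell branching by a staged construction: slice the song list to the number of needed cells, pad it with the fallback element, splice the single FREE SPACE cell in with list.insert, and chunk the flat list into rows by slicing.
import Mathlib
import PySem

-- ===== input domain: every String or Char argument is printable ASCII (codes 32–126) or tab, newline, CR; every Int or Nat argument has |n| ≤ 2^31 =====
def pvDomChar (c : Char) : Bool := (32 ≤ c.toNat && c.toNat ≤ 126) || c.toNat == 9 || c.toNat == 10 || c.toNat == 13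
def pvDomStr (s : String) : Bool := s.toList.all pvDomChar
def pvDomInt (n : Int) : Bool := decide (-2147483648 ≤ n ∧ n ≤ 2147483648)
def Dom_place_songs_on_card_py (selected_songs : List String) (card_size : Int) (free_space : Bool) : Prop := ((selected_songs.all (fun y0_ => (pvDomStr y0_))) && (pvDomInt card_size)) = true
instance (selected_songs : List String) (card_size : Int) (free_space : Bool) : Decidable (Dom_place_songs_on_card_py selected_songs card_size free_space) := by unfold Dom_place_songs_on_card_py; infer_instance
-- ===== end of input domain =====

-- B builds the card in stages (truncate+pad the flat song list, splice in the FREE SPACE cell, chunk into rows) instead of A's nested per-cell loops with a running counter (objective: alternative decomposition, same asymptotic cost).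

-- ===== PORT A =====
-- literal port of A: nested for-loops threading (card, song_idx) state
def place_songs_on_card_py (selected_songs : List String) (card_size : Int) (free_space : Bool) : List (List String) :=
  let center := PySem.Int.floordiv card_size 2
  let st := (PySem.List.pyRange 0 card_size 1).foldl
    (fun (st : List (List String) × Int) i =>
      let inner := (PySem.List.pyRange 0 card_size 1).foldl
        (fun (rs : List String × Int) j =>
          if free_space && (PySem.Int.mod card_size 2 == 1) && (i == center) && (j == center) then
            (rs.1 ++ ["FREE SPACE"], rs.2)
          else if rs.2 < (selected_songs.length : Int) then
            (rs.1 ++ [(PySem.List.pyGet? selected_songs rs.2).getD ""], rs.2 + 1)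
          else
            (rs.1 ++ [match selected_songs with | [] => "" | s :: _ => s], rs.2))
        (([] : List String), st.2)
      (st.1 ++ [inner.1], inner.2))
    (([] : List (List String)), (0 : Int))
  st.1

-- ===== PORT B =====
-- literal port of B (Source B): staged construction — slice, pad, splice, chunk
def place_songs_on_card_py_alt (selected_songs : List String) (card_size : Int) (free_space : Bool) : List (List String) :=
  let n := card_size
  if n ≤ 0 then [] else
  let total := n * n
  let has_free := free_space && (PySem.Int.mod n 2 == 1)
  let need := if has_free then total - 1 else total
  let pad := match selected_songs with | [] => "" | s :: _ => s
  let cells0 := PySem.List.slice selected_songs none (some need) ++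
    List.replicate (max 0 (need - (selected_songs.length : Int))).toNat pad
  let cells := if has_free then
      let c := PySem.Int.floordiv n 2
      PySem.List.insert cells0 (c * n + c) "FREE SPACE"
    else cells0
  (PySem.List.pyRange 0 n 1).map (fun r =>
    PySem.List.slice cells (some (r * n)) (some ((r + 1) * n)))

-- ===== PRECONDITION & SPEC =====
def Spec_place_songs_on_card_py (selected_songs : List String) (card_size : Int) (free_space : Bool) (out : List (List String)) : Prop := out = place_songs_on_card_py_alt selected_songs card_size free_space
instance (selected_songs : List String) (card_size : Int) (free_space : Bool) (out : List (List String)) : Decidable (Spec_place_songs_on_card_py selected_songs card_size free_space out) := by unfold Spec_place_songs_on_card_py; infer_instance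

-- ===== CLAIM (what is proved, stated in full; the proofs are below) =====
def Claim_equal_place_songs_on_card_py : Prop := ∀ (selected_songs : List String) (card_size : Int) (free_space : Bool), Dom_place_songs_on_card_py selected_songs card_size free_space → Spec_place_songs_on_card_py selected_songs card_size free_space (place_songs_on_card_py selected_songs card_size free_space)

-- ===== LEMMAS AND PROOFS =====

-- the cell A writes at flat position p, expressed arithmetically (proof-side abstraction)
def pvCell (selected_songs : List String) (has_free : Bool) (f : Int) (p : Int) : String :=
  if has_free && (p == f) then "FREE SPACE"
  else
    let idx := if has_free && decide (f < p) then p - 1 else p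
    if idx < (selected_songs.length : Int) then (PySem.List.pyGet? selected_songs idx).getD ""
    else match selected_songs with | [] => "" | s :: _ => s

-- number of non-free flat positions strictly before flat position p (the value of A's song_idx, capped at len)
def pvC (hf : Bool) (f : Int) (p : Int) : Int := p - (if hf = true ∧ f < p then 1 else 0)

lemma pv_flat_eq_iff (i j a b n : Int) (hn : 0 < n) (hj : 0 ≤ j) (hj' : j < n)
    (hb : 0 ≤ b) (hb' : b < n) :
    i * n + j = a * n + b ↔ (i = a ∧ j = b) := by
  constructor
  · intro h
    rcases lt_trichotomy i a with hlt | heq | hgt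
    · have h1 : i * n ≤ (a - 1) * n := mul_le_mul_of_nonneg_right (by omega) (le_of_lt hn)
      rw [sub_mul, one_mul] at h1; omega
    · exact ⟨heq, by rw [heq] at h; omega⟩
    · have h1 : a * n ≤ (i - 1) * n := mul_le_mul_of_nonneg_right (by omega) (le_of_lt hn)
      rw [sub_mul, one_mul] at h1; omega
  · rintro ⟨rfl, rfl⟩; rfl

lemma pv_center_bounds (n : Int) (hn : 0 < n) :
    0 ≤ PySem.Int.floordiv n 2 ∧ PySem.Int.floordiv n 2 < n := by
  rw [PySem.Int.floordiv_eq_ediv_of_pos (by omega)]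
  omega

lemma pv_step_cell (songs : List String) (free_space : Bool) (n : Int) (hn : 0 < n)
    (i j : Int) (hi : 0 ≤ i) (hj : 0 ≤ j) (hj' : j < n) (acc : List String) :
    (if free_space && (PySem.Int.mod n 2 == 1) && (i == PySem.Int.floordiv n 2) && (j == PySem.Int.floordiv n 2) then
        (acc ++ ["FREE SPACE"],
         min (pvC (free_space && (PySem.Int.mod n 2 == 1)) (PySem.Int.floordiv n 2 * n + PySem.Int.floordiv n 2) (i * n + j)) (songs.length : Int))
      else if min (pvC (free_space && (PySem.Int.mod n 2 == 1)) (PySem.Int.floordiv n 2 * n + PySem.Int.floordiv n 2) (i * n + j)) (songs.length : Int) < (songs.length : Int) then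
        (acc ++ [(PySem.List.pyGet? songs (min (pvC (free_space && (PySem.Int.mod n 2 == 1)) (PySem.Int.floordiv n 2 * n + PySem.Int.floordiv n 2) (i * n + j)) (songs.length : Int))).getD ""],
         min (pvC (free_space && (PySem.Int.mod n 2 == 1)) (PySem.Int.floordiv n 2 * n + PySem.Int.floordiv n 2) (i * n + j)) (songs.length : Int) + 1)
      else
        (acc ++ [match songs with | [] => "" | s :: _ => s],
         min (pvC (free_space && (PySem.Int.mod n 2 == 1)) (PySem.Int.floordiv n 2 * n + PySem.Int.floordiv n 2) (i * n + j)) (songs.length : Int)))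
     = (acc ++ [pvCell songs (free_space && (PySem.Int.mod n 2 == 1)) (PySem.Int.floordiv n 2 * n + PySem.Int.floordiv n 2) (i * n + j)],
        min (pvC (free_space && (PySem.Int.mod n 2 == 1)) (PySem.Int.floordiv n 2 * n + PySem.Int.floordiv n 2) (i * n + j + 1)) (songs.length : Int)) := by
  obtain ⟨hc0, hc1⟩ := pv_center_bounds n hn
  set c := PySem.Int.floordiv n 2 with hcdef
  set hf := (free_space && (PySem.Int.mod n 2 == 1)) with hfdef
  set f := c * n + c with hfd
  set p := i * n + j with hpd
  set L := (songs.length : Int) with hLd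
  have hp0 : 0 ≤ p := by
    have : 0 ≤ i * n := mul_nonneg hi (le_of_lt hn)
    omega
  have hL0 : 0 ≤ L := by positivity
  by_cases hhf : hf = true
  · have hiff : p = f ↔ (i = c ∧ j = c) := pv_flat_eq_iff i j c c n hn hj hj' hc0 hc1
    by_cases hij : i = c ∧ j = c
    · have hpf : p = f := hiff.mpr hij
      have hcond : (hf && (i == c) && (j == c)) = true := by
        simp [hhf, hij.1, hij.2]
      rw [hcond]
      simp only [if_true]
      unfold pvCell
      have : (hf && (p == f)) = true := by simp [hhf, hpf]
      rw [this]
      simp only [if_true]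
      have e1 : pvC hf f p = p := by
        unfold pvC; rw [if_neg (by rintro ⟨-, hlt⟩; omega)]; omega
      have e2 : pvC hf f (p + 1) = p := by
        unfold pvC; rw [if_pos ⟨hhf, by omega⟩]; omega
      rw [e1, e2]
    · have hpf : p ≠ f := fun h => hij (hiff.mp h)
      have hcond : (hf && (i == c) && (j == c)) = false := by
        rcases not_and_or.mp hij with h | h <;> simp [h, hhf]
      rw [hcond]
      simp only [Bool.false_eq_true, if_false]
      unfold pvCell
      have : (hf && (p == f)) = false := by simp [hhf, hpf]
      rw [this]
      simp only [Bool.false_eq_true, if_false]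
      have e1 : pvC hf f (p + 1) = pvC hf f p + 1 := by
        unfold pvC
        by_cases hfp : f < p
        · rw [if_pos ⟨hhf, by omega⟩, if_pos ⟨hhf, hfp⟩]; omega
        · rw [if_neg (by omega), if_neg (by tauto)]; omega
      have e2 : (if hf && decide (f < p) then p - 1 else p) = pvC hf f p := by
        unfold pvC
        by_cases hfp : f < p
        · simp [hhf, hfp]
        · simp [hhf, hfp]
      rw [e2, e1]
      by_cases hlt : pvC hf f p < L
      · rw [if_pos (by omega), if_pos hlt]
        have : min (pvC hf f p) L = pvC hf f p := by omega
        rw [this]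
        simp only [Prod.mk.injEq]
        exact ⟨by trivial, by omega⟩
      · rw [if_neg (by omega), if_neg hlt]
        simp only [Prod.mk.injEq]
        exact ⟨by trivial, by omega⟩
  · have hcond : (hf && (i == c) && (j == c)) = false := by simp [Bool.eq_false_iff.mpr hhf]
    rw [hcond]
    simp only [Bool.false_eq_true, if_false]
    unfold pvCell
    have hb : hf = false := Bool.eq_false_iff.mpr hhf
    have e0 : ∀ q, pvC false f q = q := by intro q; unfold pvC; rw [if_neg (by simp)]; omega
    rw [hb]
    simp only [Bool.false_and, Bool.false_eq_true, if_false]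
    rw [e0 p, e0 (p + 1)]
    by_cases hlt : p < L
    · rw [if_pos (by omega), if_pos hlt]
      have : min p L = p := by omega
      rw [this]
      simp only [Prod.mk.injEq]
      exact ⟨by trivial, by omega⟩
    · rw [if_neg (by omega), if_neg hlt]
      simp only [Prod.mk.injEq]
      exact ⟨by trivial, by omega⟩

lemma pv_inner (songs : List String) (free_space : Bool) (n : Int) (hn : 0 < n)
    (i : Int) (hi : 0 ≤ i) :
    ∀ m : Nat, (m : Int) ≤ n → ∀ acc : List String,
    (PySem.List.pyRange 0 (m : Int) 1).foldl
      (fun (rs : List String × Int) j =>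
        if free_space && (PySem.Int.mod n 2 == 1) && (i == PySem.Int.floordiv n 2) && (j == PySem.Int.floordiv n 2) then
          (rs.1 ++ ["FREE SPACE"], rs.2)
        else if rs.2 < (songs.length : Int) then
          (rs.1 ++ [(PySem.List.pyGet? songs rs.2).getD ""], rs.2 + 1)
        else
          (rs.1 ++ [match songs with | [] => "" | s :: _ => s], rs.2))
      (acc, min (pvC (free_space && (PySem.Int.mod n 2 == 1)) (PySem.Int.floordiv n 2 * n + PySem.Int.floordiv n 2) (i * n)) (songs.length : Int))
    = (acc ++ (PySem.List.pyRange 0 (m : Int) 1).map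
        (fun j => pvCell songs (free_space && (PySem.Int.mod n 2 == 1)) (PySem.Int.floordiv n 2 * n + PySem.Int.floordiv n 2) (i * n + j)),
       min (pvC (free_space && (PySem.Int.mod n 2 == 1)) (PySem.Int.floordiv n 2 * n + PySem.Int.floordiv n 2) (i * n + (m : Int))) (songs.length : Int)) := by
  intro m
  induction m with
  | zero =>
    intro _ acc
    simp [PySem.List.pyRange_one_eq_nil (le_refl (0 : Int))]
  | succ m ih =>
    intro hm acc
    have hm' : (m : Int) ≤ n := by push_cast at hm ⊢; omega
    have hcast : ((m + 1 : Nat) : Int) = (m : Int) + 1 := by push_cast; ring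
    rw [hcast, PySem.List.pyRange_one_succ_right (by positivity), List.foldl_append,
        List.map_append, ih hm' acc, List.foldl_cons, List.foldl_nil]
    rw [pv_step_cell songs free_space n hn i (m : Int) hi (by positivity) (by push_cast at hm; omega)]
    rw [List.map_cons, List.map_nil, List.append_assoc]
    have : i * n + ((m : Int) + 1) = i * n + (m : Int) + 1 := by ring
    rw [this]

lemma pv_outer (songs : List String) (free_space : Bool) (n : Int) (hn : 0 < n) :
    ∀ m : Nat, (m : Int) ≤ n →
    (PySem.List.pyRange 0 (m : Int) 1).foldl
      (fun (st : List (List String) × Int) i =>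
        let inner := (PySem.List.pyRange 0 n 1).foldl
          (fun (rs : List String × Int) j =>
            if free_space && (PySem.Int.mod n 2 == 1) && (i == PySem.Int.floordiv n 2) && (j == PySem.Int.floordiv n 2) then
              (rs.1 ++ ["FREE SPACE"], rs.2)
            else if rs.2 < (songs.length : Int) then
              (rs.1 ++ [(PySem.List.pyGet? songs rs.2).getD ""], rs.2 + 1)
            else
              (rs.1 ++ [match songs with | [] => "" | s :: _ => s], rs.2))
          (([] : List String), st.2)
        (st.1 ++ [inner.1], inner.2))
      (([] : List (List String)), (0 : Int))
    = ((PySem.List.pyRange 0 (m : Int) 1).map (fun i =>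
         (PySem.List.pyRange 0 n 1).map
           (fun j => pvCell songs (free_space && (PySem.Int.mod n 2 == 1)) (PySem.Int.floordiv n 2 * n + PySem.Int.floordiv n 2) (i * n + j))),
       min (pvC (free_space && (PySem.Int.mod n 2 == 1)) (PySem.Int.floordiv n 2 * n + PySem.Int.floordiv n 2) ((m : Int) * n)) (songs.length : Int)) := by
  obtain ⟨hc0, hc1⟩ := pv_center_bounds n hn
  have hF0 : 0 ≤ PySem.Int.floordiv n 2 * n + PySem.Int.floordiv n 2 := by
    have : 0 ≤ PySem.Int.floordiv n 2 * n := mul_nonneg hc0 (le_of_lt hn)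
    omega
  intro m
  induction m with
  | zero =>
    intro _
    simp only [Nat.cast_zero, PySem.List.pyRange_one_eq_nil (le_refl (0 : Int)),
      List.foldl_nil, List.map_nil, Prod.mk.injEq]
    refine ⟨by trivial, ?_⟩
    have : pvC (free_space && (PySem.Int.mod n 2 == 1)) (PySem.Int.floordiv n 2 * n + PySem.Int.floordiv n 2) (0 * n) = 0 := by
      unfold pvC; rw [if_neg (by rintro ⟨-, h⟩; omega)]; omega
    rw [this]
    omega
  | succ m ih =>
    intro hm
    have hm' : (m : Int) ≤ n := by push_cast at hm ⊢; omega
    have hcast : ((m + 1 : Nat) : Int) = (m : Int) + 1 := by push_cast; ring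
    rw [hcast, PySem.List.pyRange_one_succ_right (by positivity), List.foldl_append,
        List.map_append, ih hm', List.foldl_cons, List.foldl_nil]
    simp only []
    have hrow := pv_inner songs free_space n hn (m : Int) (by positivity)
      n.toNat (by rw [Int.toNat_of_nonneg (le_of_lt hn)]) []
    rw [Int.toNat_of_nonneg (le_of_lt hn)] at hrow
    rw [hrow, List.nil_append, List.map_cons, List.map_nil, Prod.mk.injEq]
    refine ⟨by trivial, ?_⟩
    have : (m : Int) * n + n = ((m : Int) + 1) * n := by ring
    rw [this]

-- ===== B-side lemmas =====

-- truncate-and-pad equals a pointwise getD table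
lemma pv_take_append_replicate (xs : List String) (m : Nat) (x : String) :
    xs.take m ++ List.replicate (m - xs.length) x = (List.range m).map (fun p => xs.getD p x) := by
  apply List.ext_getElem
  · simp; omega
  · intro i h1 h2
    simp at h2
    by_cases hi : i < xs.length
    · rw [List.getElem_append_left (by simp; omega)]
      simp [List.getElem_take, List.getD_eq_getElem?_getD, List.getElem?_eq_getElem hi]
    · rw [List.getElem_append_right (by simp; omega)]
      simp [List.getD_eq_getElem?_getD, List.getElem?_eq_none (by omega : xs.length ≤ i)]

-- the non-free branch of pvCell is a getD with the fallback as default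
lemma pv_cell_idx (songs : List String) (i : Int) (hi : 0 ≤ i) :
    (if i < (songs.length : Int) then (PySem.List.pyGet? songs i).getD "" else match songs with | [] => "" | s :: _ => s)
      = songs.getD i.toNat (match songs with | [] => "" | s :: _ => s) := by
  by_cases h : i < (songs.length : Int)
  · rw [if_pos h, PySem.List.pyGet?_of_nonneg songs hi]
    have hlt : i.toNat < songs.length := by omega
    rw [List.getElem?_eq_getElem hlt]
    simp [List.getD_eq_getElem?_getD, List.getElem?_eq_getElem hlt]
  · rw [if_neg h, List.getD_eq_getElem?_getD, List.getElem?_eq_none (by omega : songs.length ≤ i.toNat)]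
    cases songs <;> rfl

-- flat-cell table, no free space: truncate+pad equals the pvCell table on range (m*m)
lemma pv_cells_flat_nofree (songs : List String) (n f : Int) (hn : 0 < n) :
    PySem.List.slice songs none (some (n * n)) ++
      List.replicate (max 0 ((n * n) - (songs.length : Int))).toNat
        (match songs with | [] => "" | s :: _ => s)
    = (List.range (n.toNat * n.toNat)).map
        (fun (q : Nat) => pvCell songs false f (q : Int)) := by
  have hm : (n.toNat : Int) = n := Int.toNat_of_nonneg (le_of_lt hn)
  set m := n.toNat with hmdef
  have hcast2 : n * n = ((m * m : Nat) : Int) := by push_cast [hm]; ring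
  rw [hcast2, PySem.List.slice_to_natCast]
  have hmax : (max 0 (((m * m : Nat) : Int) - (songs.length : Int))).toNat = m * m - songs.length := by
    omega
  rw [hmax, pv_take_append_replicate]
  apply List.map_congr_left
  intro q hq
  unfold pvCell
  simp only [Bool.false_and, Bool.false_eq_true, if_false]
  rw [pv_cell_idx songs (q : Int) (by positivity)]
  simp

-- flat-cell table, free space: truncate+pad then splice equals the pvCell table on range (m*m)
lemma pv_cells_flat_free (songs : List String) (n : Int) (hn : 0 < n) :
    PySem.List.insert
      (PySem.List.slice songs none (some (n * n - 1)) ++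
        List.replicate (max 0 ((n * n - 1) - (songs.length : Int))).toNat
          (match songs with | [] => "" | s :: _ => s))
      (PySem.Int.floordiv n 2 * n + PySem.Int.floordiv n 2) "FREE SPACE"
    = (List.range (n.toNat * n.toNat)).map
        (fun (q : Nat) => pvCell songs true
          (PySem.Int.floordiv n 2 * n + PySem.Int.floordiv n 2) (q : Int)) := by
  obtain ⟨hc0, hc1⟩ := pv_center_bounds n hn
  set c := PySem.Int.floordiv n 2 with hcdef
  set f := c * n + c with hfdef
  set pad := (match songs with | [] => "" | s :: _ => s) with hpad
  have hm : (n.toNat : Int) = n := Int.toNat_of_nonneg (le_of_lt hn)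
  set m := n.toNat with hmdef
  have hm0 : 0 < m := by omega
  have hcast2 : n * n = ((m * m : Nat) : Int) := by push_cast [hm]; ring
  have hf0 : 0 ≤ f := by
    have : 0 ≤ c * n := mul_nonneg hc0 (le_of_lt hn)
    omega
  have hfmm : f ≤ n * n - 1 := by
    have h2 : c * n ≤ (n - 1) * n := mul_le_mul_of_nonneg_right (by omega) (le_of_lt hn)
    rw [sub_mul, one_mul] at h2
    omega
  have hneed : n * n - 1 = ((m * m - 1 : Nat) : Int) := by omega
  rw [hneed, PySem.List.slice_to_natCast]
  have hmax : (max 0 (((m * m - 1 : Nat) : Int) - (songs.length : Int))).toNat = (m * m - 1) - songs.length := by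
    omega
  rw [hmax, pv_take_append_replicate]
  set fN := f.toNat with hfNdef
  set T := (List.range (m * m - 1)).map (fun p => songs.getD p pad) with hT
  have hTlen : T.length = m * m - 1 := by simp [hT]
  have hfNle : fN ≤ T.length := by omega
  have hfc : f = (fN : Int) := by omega
  rw [hfc, PySem.List.insert_natCast T fN _ hfNle]
  have hlen : (List.take fN T).length = fN := by simp [List.length_take, hTlen]; omega
  apply List.ext_getElem
  · simp [hTlen]; omega
  · intro q h1 h2
    have h2' : q < m * m := by simpa using h2
    rw [List.getElem_map, List.getElem_range]
    rcases lt_trichotomy q fN with hq | hq | hq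
    · rw [List.getElem_append_left (by rw [hlen]; omega)]
      simp only [List.getElem_take, hT, List.getElem_map, List.getElem_range]
      unfold pvCell
      have hne : ((q : Int) == ((fN : Nat) : Int)) = false := by simp; omega
      rw [hne]
      simp only [Bool.and_false, Bool.false_eq_true, if_false, Bool.true_and]
      have hdec : (decide (((fN : Nat) : Int) < (q : Int))) = false := by simp; omega
      rw [hdec]
      simp only [Bool.false_eq_true, if_false]
      rw [pv_cell_idx songs (q : Int) (by positivity)]
      simp [hpad]
    · rw [List.getElem_append_right (by rw [hlen]; omega), List.getElem_cons]
      split_ifs with h0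
      · unfold pvCell
        have heq : ((q : Int) == ((fN : Nat) : Int)) = true := by simp; omega
        rw [heq]
        rfl
      · exfalso; rw [hlen] at h0; omega
    · rw [List.getElem_append_right (by rw [hlen]; omega), List.getElem_cons]
      split_ifs with h0
      · exfalso; rw [hlen] at h0; omega
      · rw [List.getElem_drop]
        simp only [hT, List.getElem_map, List.getElem_range]
        have hidx2 : fN + (q - (List.take fN T).length - 1) = q - 1 := by rw [hlen]; omega
        rw [hidx2]
        unfold pvCell
        have hne : ((q : Int) == ((fN : Nat) : Int)) = false := by simp; omega
        rw [hne]
        simp only [Bool.and_false, Bool.false_eq_true, if_false, Bool.true_and]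
        have hdec : (decide (((fN : Nat) : Int) < (q : Int))) = true := by simp; omega
        rw [hdec]
        simp only [if_true]
        rw [pv_cell_idx songs ((q : Int) - 1) (by omega)]
        have hq1 : ((q : Int) - 1).toNat = q - 1 := by omega
        rw [hq1, hpad]

-- chunking the flat table by row slices gives A's grid
lemma pv_chunk (songs : List String) (hf : Bool) (f n : Int) (hn : 0 < n) :
    (PySem.List.pyRange 0 n 1).map (fun r =>
      PySem.List.slice
        ((List.range (n.toNat * n.toNat)).map (fun (q : Nat) => pvCell songs hf f (q : Int)))
        (some (r * n)) (some ((r + 1) * n)))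
    = (PySem.List.pyRange 0 n 1).map (fun i =>
        (PySem.List.pyRange 0 n 1).map (fun j => pvCell songs hf f (i * n + j))) := by
  have hmi : (n.toNat : Int) = n := Int.toNat_of_nonneg (le_of_lt hn)
  set m := n.toNat with hmdef
  conv_lhs => rw [← hmi, PySem.List.pyRange_zero_natCast]
  conv_rhs => rw [← hmi, PySem.List.pyRange_zero_natCast]
  rw [List.map_map, List.map_map]
  apply List.map_congr_left
  intro i hi
  rw [List.mem_range] at hi
  simp only [Function.comp]
  -- row i: slice of the flat table
  have h1 : (i : Int) * (m : Int) = ((i * m : Nat) : Int) := by push_cast; ring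
  have h2 : ((i : Int) + 1) * (m : Int) = ((i * m : Nat) : Int) + ((m : Nat) : Int) := by push_cast; ring
  rw [h1, h2, PySem.List.slice_natCast_add]
  rw [List.map_map]
  have hrow : i * m + m ≤ m * m := by
    have := Nat.mul_le_mul_right m (show i + 1 ≤ m by omega)
    rw [add_mul, one_mul] at this
    omega
  apply List.ext_getElem
  · simp [List.length_take, List.length_drop]
    omega
  · intro k hk1 hk2
    have hk : k < m := by simpa using hk2
    rw [List.getElem_take, List.getElem_drop, List.getElem_map, List.getElem_range,
        List.getElem_map, List.getElem_range]
    simp only [Function.comp]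
    congr 1

-- ===== VERDICT =====
theorem place_songs_on_card_py_spec : Claim_equal_place_songs_on_card_py := by
  intro selected_songs card_size free_space _
  unfold Spec_place_songs_on_card_py
  by_cases hn : 0 < card_size
  · have hA := pv_outer selected_songs free_space card_size hn card_size.toNat
      (by rw [Int.toNat_of_nonneg (le_of_lt hn)])
    rw [Int.toNat_of_nonneg (le_of_lt hn)] at hA
    simp only [place_songs_on_card_py, place_songs_on_card_py_alt]
    rw [hA, if_neg (by omega : ¬ card_size ≤ 0)]
    by_cases hhf : (free_space && (PySem.Int.mod card_size 2 == 1)) = true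
    · simp only [hhf, if_true]
      rw [pv_cells_flat_free selected_songs card_size hn,
          pv_chunk selected_songs true _ card_size hn]
    · have hb : (free_space && (PySem.Int.mod card_size 2 == 1)) = false := Bool.eq_false_iff.mpr hhf
      simp only [hb, Bool.false_eq_true, if_false]
      rw [pv_cells_flat_nofree selected_songs card_size
            (PySem.Int.floordiv card_size 2 * card_size + PySem.Int.floordiv card_size 2) hn,
          pv_chunk selected_songs false _ card_size hn]
  · simp [place_songs_on_card_py, place_songs_on_card_py_alt,
      PySem.List.pyRange_one_eq_nil (by omega : card_size ≤ 0)]
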